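-- pv_equiv track=rewrite | github.com/loudove/pysimpp | pysimpp/utils/utils.py | isrange
-- ===== SOURCE A (Python) =====
-- def isnumber(string, numbertype=int):
--     '''Check if the given string is of type numbertype and if yes return the number'''
--     try:
--         val = numbertype(string)
--     except:
--         val = None
--     return val
--
-- def ispositive( string, numbertype=int):
--     '''Check if the given string is possitive number of numbertype and if yes return the number'''
--     val = isnumber( string, numbertype)
--     if val and val > numbertype(0):
--         return val
--     else:
--         return None
--
-- def isrange(string, positive=True, sep=',', rangesep=':'):
--     '''Check if the given string is list of positive numbers (of int type) ranges separated by sep.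
--        If yes returns the list of integers otherwise returns an empty list. If positive is True
--        the number should also be positive. The range speperator can be specifide using the rangesep argument. '''
--     fnc = ispositive if positive else isnumber
--     tk = string.split( sep)
--     numbers = []
--     for t in tk:
--         r = t.split( rangesep)
--         r1 = fnc( r[0])
--         r2 = r1 if len( r) == 1 else fnc( r[1])
--         s = 1 if not len( r) == 3 else int(r[2])
--         if r1 and r2:
--             numbers += list(range( min(r1,r2), max(r1,r2)+1, s))
--         else:
--             numbers = []
--             break
--     return numbers
-- ===== SOURCE B (Python) =====
-- def isnumber(string, numbertype=int):
--     try: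
--         val = numbertype(string)
--     except:
--         val = None
--     return val
--
-- def ispositive(string, numbertype=int):
--     val = isnumber(string, numbertype)
--     if val and val > numbertype(0):
--         return val
--     else:
--         return None
--
-- def isrange(string, positive=True, sep=',', rangesep=':'):
--     '''Recursive-descent variant: scan the string itself with str.find, parse one
--        segment at a time, propagate failure as None and concatenate back-to-front.'''
--     fnc = ispositive if positive else isnumber
--
--     def segment(t):
--         # one token -> its list of integers, or None if invalid
--         r = t.split(rangesep)
--         lo = fnc(r[0])
--         hi = lo if len(r) == 1 else fnc(r[1])
--         step = int(r[2]) if len(r) == 3 else 1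
--         if lo and hi:
--             return list(range(min(lo, hi), max(lo, hi) + 1, step))
--         return None
--
--     def parse(s):
--         # s = remaining unparsed suffix of the input
--         i = s.find(sep)
--         head = segment(s if i < 0 else s[:i])
--         if head is None:
--             return None
--         if i < 0:
--             return head
--         tail = parse(s[i + len(sep):])
--         return None if tail is None else head + tail
--
--     res = parse(string)
--     return [] if res is None else res
-- ===== Notes on version B (the rewrite author's own statement) =====
-- stated objective: alternative
-- what changed: A splits the whole string up front and runs an accumulate-and-reset loop (extend, then reset to [] and break on a bad token); B never builds the token list: it recursively scans the string itself with str.find and slicing, parses one segment at a time, propagates failure as None, and concatenates the results back-to-front.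
import Mathlib
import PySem

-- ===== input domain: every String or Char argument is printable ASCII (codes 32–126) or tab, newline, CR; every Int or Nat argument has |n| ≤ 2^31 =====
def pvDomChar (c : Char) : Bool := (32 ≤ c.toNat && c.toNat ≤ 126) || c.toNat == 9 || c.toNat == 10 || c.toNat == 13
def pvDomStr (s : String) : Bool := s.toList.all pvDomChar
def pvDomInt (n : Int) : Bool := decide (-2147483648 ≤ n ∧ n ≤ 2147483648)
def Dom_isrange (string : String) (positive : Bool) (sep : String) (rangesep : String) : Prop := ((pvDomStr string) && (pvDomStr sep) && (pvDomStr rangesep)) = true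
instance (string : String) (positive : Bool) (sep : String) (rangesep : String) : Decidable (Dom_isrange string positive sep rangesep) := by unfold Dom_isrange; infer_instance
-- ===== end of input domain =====

-- B replaces A's split-then-accumulate-and-reset loop by a recursive descent over the
-- string itself (str.find + slicing), propagating failure as None and concatenating
-- results back-to-front; alternative decomposition, not faster.


-- ===== PORT A =====
def pvIsnumber (s : String) : Option Int := PySem.Int.ofStr? s  -- isnumber: int(s) or None

def pvIspositive (s : String) : Option Int :=            -- ispositive: 'if val and val > 0'
  match pvIsnumber s with
  | some v => if v > 0 then some v else none
  | none => none

def pvTruthy (o : Option Int) : Bool :=                  -- Python truthiness of r1/r2 (None and 0 falsy)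
  match o with
  | some v => v != 0
  | none => false

-- A's loop over tokens, accumulating 'numbers', resetting to [] and breaking on a bad token.
-- The '.getD' defaults are only reached where the Python raises (sep/rangesep = '' or int(r[2]) fails),
-- excluded by Pre_ below; elsewhere the port is exact.
def pvLoopA (fnc : String → Option Int) (rangesep : String) : List String → List Int → List Int
  | [], numbers => numbers
  | t :: tk, numbers =>
      let r := (PySem.Str.split? t rangesep).getD []
      let r1 := fnc (PySem.List.pyGetD r 0 "")
      let r2 := if r.length == 1 then r1 else fnc (PySem.List.pyGetD r 1 "")
      let s := if r.length == 3 then (PySem.Int.ofStr? (PySem.List.pyGetD r 2 "")).getD 1 else 1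
      if pvTruthy r1 && pvTruthy r2 then
        pvLoopA fnc rangesep tk
          (numbers ++ PySem.List.pyRange (min (r1.getD 0) (r2.getD 0)) (max (r1.getD 0) (r2.getD 0) + 1) s)
      else []

def isrange (string : String) (positive : Bool) (sep : String) (rangesep : String) : List Int :=
  let fnc := if positive then pvIspositive else pvIsnumber
  let tk := (PySem.Str.split? string sep).getD []
  pvLoopA fnc rangesep tk []

-- ===== PORT B =====
-- B works on the character list of the string ('segment' / 'parse' from Source B).
def pvNumC (cs : List Char) : Option Int := PySem.Int.ofChars? cs      -- isnumber on a char slice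

def pvPosC (cs : List Char) : Option Int :=
  match pvNumC cs with
  | some v => if v > 0 then some v else none
  | none => none

def pvFncC (positive : Bool) (cs : List Char) : Option Int :=
  if positive then pvPosC cs else pvNumC cs

-- segment: one token -> its integers, or none if invalid (same '.getD' remarks as in port A)
def pvSegment (positive : Bool) (rs : List Char) (t : List Char) : Option (List Int) :=
  let r := (PySem.Chars.split? t rs).getD []
  let lo := pvFncC positive (PySem.List.pyGetD r 0 [])
  let hi := if r.length == 1 then lo else pvFncC positive (PySem.List.pyGetD r 1 [])
  let step := if r.length == 3 then (PySem.Int.ofChars? (PySem.List.pyGetD r 2 [])).getD 1 else 1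
  if pvTruthy lo && pvTruthy hi then
    some (PySem.List.pyRange (min (lo.getD 0) (hi.getD 0)) (max (lo.getD 0) (hi.getD 0) + 1) step)
  else none

-- needed by pvParse's termination proof: the empty segment never parses
theorem pvSegment_nil (positive : Bool) (rs : List Char) : pvSegment positive rs [] = none := by
  cases rs with
  | nil => cases positive <;> rfl
  | cons c cs => cases positive <;> rfl

-- parse: recursive descent over the remaining suffix s, via find / slices
def pvParse (positive : Bool) (sep rs : List Char) (s : List Char) : Option (List Int) :=
  match htok : pvSegment positive rs
      (if PySem.Chars.find s sep < 0 then s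
       else PySem.List.slice s none (some (PySem.Chars.find s sep))) with
  | none => none
  | some head =>
      if h : PySem.Chars.find s sep < 0 then some head
      else
        match pvParse positive sep rs
            (PySem.List.slice s (some (PySem.Chars.find s sep + sep.length)) none) with
        | none => none
        | some tail => some (head ++ tail)
termination_by s.length
decreasing_by
  · by_cases hsep : sep = []
    · exfalso
      subst hsep
      rw [PySem.Chars.find_nil] at htok
      rw [PySem.List.slice_to s (by norm_num : (0:Int) ≤ 0)] at htok
      simp only [Int.toNat_zero, List.take_zero] at htok
      rw [dif_neg (by norm_num)] at htok
      rw [pvSegment_nil] at htok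
      simp at htok
    · have hnn : 0 ≤ PySem.Chars.find s sep := by omega
      have hinf : sep <:+: s := (PySem.Chars.find_nonneg_iff s sep).mp hnn
      have hslen : 1 ≤ sep.length := by
        cases sep with | nil => exact absurd rfl hsep | cons a l => simp
      have hsl : sep.length ≤ s.length := hinf.length_le
      rw [PySem.List.slice_from s (by omega : (0:Int) ≤ PySem.Chars.find s sep + sep.length)]
      simp only [List.length_drop]
      omega

def isrange_alt (string : String) (positive : Bool) (sep : String) (rangesep : String) : List Int :=
  match pvParse positive sep.toList rangesep.toList string.toList with
  | none => []
  | some l => l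

-- ===== PRECONDITION & SPEC =====
def pvFnc (positive : Bool) (s : String) : Option Int :=
  if positive then pvIspositive s else pvIsnumber s

-- the third range part of a token, if it has exactly three parts
def pvStep3 (rangesep : String) (t : String) : Option (Option Int) :=
  let r := (PySem.Str.split? t rangesep).getD []
  if r.length = 3 then some (PySem.Int.ofStr? (PySem.List.pyGetD r 2 "")) else none

-- whether A's guard 'r1 and r2' holds for a token
def pvValidTok (positive : Bool) (rangesep : String) (t : String) : Bool :=
  let r := (PySem.Str.split? t rangesep).getD []
  pvTruthy (pvFnc positive (PySem.List.pyGetD r 0 "")) &&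
  pvTruthy (if r.length == 1 then pvFnc positive (PySem.List.pyGetD r 0 "")
            else pvFnc positive (PySem.List.pyGetD r 1 ""))

-- Pre_ excludes exactly the inputs on which the Python A raises: empty sep (ValueError in
-- string.split), empty rangesep (ValueError in the first token's split), an unparseable third
-- range part in any token A reaches (the valid prefix plus the first invalid token, ValueError
-- in int(r[2])), and a zero step in a valid token (ValueError in range).
def Pre_isrange (string : String) (positive : Bool) (sep : String) (rangesep : String) : Prop :=
  sep ≠ "" ∧ rangesep ≠ "" ∧
  (∀ t ∈ ((PySem.Str.split? string sep).getD []).takeWhile (pvValidTok positive rangesep),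
      pvStep3 rangesep t ≠ some none ∧ pvStep3 rangesep t ≠ some (some 0)) ∧
  (∀ t ∈ ((PySem.Str.split? string sep).getD []).take
      ((((PySem.Str.split? string sep).getD []).takeWhile (pvValidTok positive rangesep)).length + 1),
      pvStep3 rangesep t ≠ some none)
instance (string : String) (positive : Bool) (sep : String) (rangesep : String) : Decidable (Pre_isrange string positive sep rangesep) := by unfold Pre_isrange; infer_instance

def pvWitness_isrange : String × Bool × String × String := ("1:3,7", true, ",", ":")

def Spec_isrange (string : String) (positive : Bool) (sep : String) (rangesep : String) (out : List Int) : Prop := out = isrange_alt string positive sep rangesep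
instance (string : String) (positive : Bool) (sep : String) (rangesep : String) (out : List Int) : Decidable (Spec_isrange string positive sep rangesep out) := by unfold Spec_isrange; infer_instance

-- ===== CLAIM =====
def Claim_equal_isrange : Prop := ∀ (string : String) (positive : Bool) (sep : String) (rangesep : String), Dom_isrange string positive sep rangesep → Pre_isrange string positive sep rangesep → Spec_isrange string positive sep rangesep (isrange string positive sep rangesep)

-- ===== LEMMAS AND PROOFS =====

-- Maybe-style value of a token list: none if a token fails, else the concatenation (char level)
def pvTokensC (positive : Bool) (rs : List Char) : List (List Char) → Option (List Int)
  | [] => some []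
  | t :: tk =>
      match pvSegment positive rs t with
      | none => none
      | some h =>
          match pvTokensC positive rs tk with
          | none => none
          | some rest => some (h ++ rest)

-- the same at the String level, with A's inline per-token computation
def pvTokensS (fnc : String → Option Int) (rangesep : String) : List String → Option (List Int)
  | [] => some []
  | t :: tk =>
      let r := (PySem.Str.split? t rangesep).getD []
      let r1 := fnc (PySem.List.pyGetD r 0 "")
      let r2 := if r.length == 1 then r1 else fnc (PySem.List.pyGetD r 1 "")
      let s := if r.length == 3 then (PySem.Int.ofStr? (PySem.List.pyGetD r 2 "")).getD 1 else 1
      if pvTruthy r1 && pvTruthy r2 then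
        match pvTokensS fnc rangesep tk with
        | none => none
        | some rest =>
            some (PySem.List.pyRange (min (r1.getD 0) (r2.getD 0)) (max (r1.getD 0) (r2.getD 0) + 1) s ++ rest)
      else none

-- A's break-loop in terms of pvTokensS
theorem pvLoopA_eq (fnc : String → Option Int) (rangesep : String) (tk : List String) (acc : List Int) :
    pvLoopA fnc rangesep tk acc =
      match pvTokensS fnc rangesep tk with
      | none => []
      | some l => acc ++ l := by
  induction tk generalizing acc with
  | nil => simp [pvLoopA, pvTokensS]
  | cons t tk ih =>
      simp only [pvLoopA, pvTokensS]
      by_cases hg : (pvTruthy (fnc (PySem.List.pyGetD ((PySem.Str.split? t rangesep).getD []) 0 "")) &&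
          pvTruthy (if ((PySem.Str.split? t rangesep).getD []).length == 1
                    then fnc (PySem.List.pyGetD ((PySem.Str.split? t rangesep).getD []) 0 "")
                    else fnc (PySem.List.pyGetD ((PySem.Str.split? t rangesep).getD []) 1 ""))) = true
      · rw [if_pos hg, if_pos hg, ih]
        cases pvTokensS fnc rangesep tk <;> simp
      · rw [if_neg hg, if_neg hg]

-- clean structural version of Chars.splitOn (proof-side only)
def pvSplitF (sep : List Char) : List Char → List Char → List (List Char)
  | [], cur => [cur]
  | c :: rest, cur =>
      if h : sep.isPrefixOf (c :: rest) ∧ sep ≠ [] then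
        cur :: pvSplitF sep ((c :: rest).drop sep.length) []
      else
        pvSplitF sep rest (cur ++ [c])
termination_by l => l.length
decreasing_by
  · have hp : sep <+: c :: rest := List.isPrefixOf_iff_prefix.mp h.1
    have h1 : 1 ≤ sep.length := by
      cases hs : sep with | nil => exact absurd hs h.2 | cons a m => simp
    have h2 : sep.length ≤ (c :: rest).length := hp.length_le
    simp only [List.length_drop]
    simp at h2 ⊢
    omega
  · simp

theorem pvSplitF_go (sep : List Char) (hsep : sep ≠ []) :
    ∀ (fuel : Nat) (l cur : List Char) (acc : List (List Char)), l.length < fuel →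
      PySem.Chars.splitOn.go sep fuel l cur acc = acc.reverse ++ pvSplitF sep l cur.reverse := by
  intro fuel
  induction fuel with
  | zero => intro l cur acc h; omega
  | succ fuel ih =>
      intro l cur acc h
      cases l with
      | nil =>
          simp [PySem.Chars.splitOn.go, pvSplitF]
      | cons c rest =>
          rw [pvSplitF]
          by_cases hpre : sep.isPrefixOf (c :: rest) = true
          · have hp : sep <+: c :: rest := List.isPrefixOf_iff_prefix.mp hpre
            have h1 : 1 ≤ sep.length := by
              cases hs : sep with | nil => exact absurd hs hsep | cons a m => simp
            have h2 : sep.length ≤ (c :: rest).length := hp.length_le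
            rw [dif_pos ⟨hpre, hsep⟩]
            simp only [PySem.Chars.splitOn.go, hpre, if_pos]
            rw [ih (List.drop sep.length (c :: rest)) [] (cur.reverse :: acc)
                (by simp only [List.length_drop]; simp at h h2 ⊢; omega)]
            simp
          · rw [dif_neg (by simp [hpre])]
            simp only [PySem.Chars.splitOn.go, hpre]
            rw [ih rest (c :: cur) acc (by simp at h ⊢; omega)]
            simp

theorem splitOn_eq_pvSplitF (s sep : List Char) (hsep : sep ≠ []) :
    PySem.Chars.splitOn s sep = pvSplitF sep s [] := by
  have := pvSplitF_go sep hsep (s.length + 1) s [] [] (by omega)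
  simpa [PySem.Chars.splitOn] using this

theorem pvSplitF_not_infix (sep : List Char) :
    ∀ (l cur : List Char), ¬ sep <:+: l → pvSplitF sep l cur = [cur ++ l] := by
  intro l
  induction l with
  | nil => intro cur hn; simp [pvSplitF]
  | cons c rest ih =>
      intro cur hn
      rw [pvSplitF]
      rw [dif_neg (by
        rintro ⟨h1, _⟩
        exact hn ((List.isPrefixOf_iff_prefix.mp h1).isInfix))]
      rw [ih (cur ++ [c]) (fun hi => hn (hi.trans (List.suffix_cons c rest).isInfix))]
      simp

theorem pvSplitF_found (sep : List Char) (hsep : sep ≠ []) :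
    ∀ (n : Nat) (l cur : List Char), sep <+: l.drop n → (∀ i < n, ¬ sep <+: l.drop i) →
      pvSplitF sep l cur = (cur ++ l.take n) :: pvSplitF sep (l.drop (n + sep.length)) [] := by
  intro n
  induction n with
  | zero =>
      intro l cur hp _
      simp only [List.drop_zero] at hp
      cases l with
      | nil =>
          exact absurd (List.prefix_nil.mp hp) hsep
      | cons c rest =>
          rw [pvSplitF]
          rw [dif_pos ⟨List.isPrefixOf_iff_prefix.mpr hp, hsep⟩]
          simp
  | succ n ih =>
      intro l cur hp hmin
      have hnotl : ¬ sep <+: l := by simpa using hmin 0 (by omega)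
      cases l with
      | nil =>
          exfalso
          simp only [List.drop_nil] at hp
          exact hsep (List.prefix_nil.mp hp)
      | cons c rest =>
          rw [pvSplitF]
          rw [dif_neg (by rintro ⟨h1, _⟩; exact hnotl (List.isPrefixOf_iff_prefix.mp h1))]
          rw [ih rest (cur ++ [c]) (by simpa using hp)
              (fun i hi => by simpa using hmin (i + 1) (by omega))]
          rw [show n + 1 + sep.length = (n + sep.length) + 1 by omega, List.drop_succ_cons]
          simp

-- unfolding of splitOn through find
theorem splitOn_no_find (s sep : List Char) (hsep : sep ≠ [])
    (h : PySem.Chars.find s sep < 0) : PySem.Chars.splitOn s sep = [s] := by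
  have hni : ¬ sep <:+: s := by
    intro hi
    have := (PySem.Chars.find_nonneg_iff s sep).mpr hi
    omega
  rw [splitOn_eq_pvSplitF s sep hsep, pvSplitF_not_infix sep s [] hni]
  simp

theorem splitOn_find (s sep : List Char) (hsep : sep ≠ [])
    (h : ¬ PySem.Chars.find s sep < 0) :
    PySem.Chars.splitOn s sep =
      s.take (PySem.Chars.find s sep).toNat ::
        PySem.Chars.splitOn (s.drop ((PySem.Chars.find s sep).toNat + sep.length)) sep := by
  have hnn : 0 ≤ PySem.Chars.find s sep := by omega
  obtain ⟨hp, hmin⟩ := PySem.Chars.find_spec (s := s) (sub := sep) hnn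
  rw [splitOn_eq_pvSplitF s sep hsep,
      pvSplitF_found sep hsep (PySem.Chars.find s sep).toNat s [] hp hmin,
      splitOn_eq_pvSplitF _ sep hsep]
  simp

-- B's recursive descent computes the token-list value
theorem pvParse_eq_tokens (positive : Bool) (sep rs : List Char) (hsep : sep ≠ []) :
    ∀ (s : List Char), pvParse positive sep rs s = pvTokensC positive rs (PySem.Chars.splitOn s sep) := by
  intro s
  induction hind : s.length using Nat.strong_induction_on generalizing s with
  | _ n ih =>
  subst hind
  rw [pvParse]
  by_cases h : PySem.Chars.find s sep < 0
  · rw [splitOn_no_find s sep hsep h]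
    simp only [pvTokensC]
    split
    · rename_i htok
      rw [if_pos h] at htok
      simp [htok]
    · rename_i head htok
      rw [if_pos h] at htok
      simp [htok, h]
  · have hnn : 0 ≤ PySem.Chars.find s sep := by omega
    have h1 : 1 ≤ sep.length := by
      cases hs : sep with | nil => exact absurd hs hsep | cons a m => simp
    have hinf : sep <:+: s := (PySem.Chars.find_nonneg_iff s sep).mp hnn
    have h2 : sep.length ≤ s.length := hinf.length_le
    have harg : (PySem.Chars.find s sep + (sep.length : Int)).toNat
        = (PySem.Chars.find s sep).toNat + sep.length := by omega
    rw [splitOn_find s sep hsep h]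
    simp only [pvTokensC]
    split
    · rename_i htok
      rw [if_neg h, PySem.List.slice_to s hnn] at htok
      simp [htok]
    · rename_i head htok
      rw [if_neg h, PySem.List.slice_to s hnn] at htok
      rw [dif_neg h]
      rw [PySem.List.slice_from s (by omega : (0:Int) ≤ PySem.Chars.find s sep + sep.length), harg]
      rw [ih (s.drop ((PySem.Chars.find s sep).toNat + sep.length)).length
            (by simp only [List.length_drop]; omega) _ rfl]
      cases pvTokensC positive rs
          (PySem.Chars.splitOn (s.drop ((PySem.Chars.find s sep).toNat + sep.length)) sep) <;>
        simp [htok]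

-- helpers bridge: B's char-level parsers are A's String-level ones
theorem pvFncC_toList (positive : Bool) (x : String) :
    pvFncC positive x.toList = pvFnc positive x := by
  cases positive <;> rfl

theorem split_getD_bridge (t rangesep : String) :
    (PySem.Chars.split? t.toList rangesep.toList).getD [] =
      ((PySem.Str.split? t rangesep).getD []).map String.toList := by
  rw [← PySem.Str.split?_map]
  cases PySem.Str.split? t rangesep <;> simp

-- token-list bridge: B's segment-by-segment value equals A's per-token value
theorem pvTokens_bridge (positive : Bool) (rangesep : String) :
    ∀ tk : List String,
      pvTokensC positive rangesep.toList (tk.map String.toList) = pvTokensS (pvFnc positive) rangesep tk := by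
  intro tk
  induction tk with
  | nil => rfl
  | cons t tk ih =>
      simp only [List.map_cons, pvTokensC, pvTokensS, pvSegment]
      rw [split_getD_bridge t rangesep]
      rw [show ([] : List Char) = String.toList "" from rfl]
      rw [PySem.List.pyGetD_map, PySem.List.pyGetD_map, PySem.List.pyGetD_map]
      simp only [List.length_map, pvFncC_toList]
      rw [show PySem.Int.ofChars? (PySem.List.pyGetD ((PySem.Str.split? t rangesep).getD []) 2 "").toList
            = PySem.Int.ofStr? (PySem.List.pyGetD ((PySem.Str.split? t rangesep).getD []) 2 "") from rfl]
      by_cases hg : (pvTruthy (pvFnc positive (PySem.List.pyGetD ((PySem.Str.split? t rangesep).getD []) 0 "")) &&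
          pvTruthy (if ((PySem.Str.split? t rangesep).getD []).length == 1
                    then pvFnc positive (PySem.List.pyGetD ((PySem.Str.split? t rangesep).getD []) 0 "")
                    else pvFnc positive (PySem.List.pyGetD ((PySem.Str.split? t rangesep).getD []) 1 ""))) = true
      · rw [if_pos hg, if_pos hg, ih]
      · rw [if_neg hg, if_neg hg]

-- ===== VERDICT =====
-- ===== VERDICT =====
theorem isrange_spec : Claim_equal_isrange := by
  intro string positive sep rangesep _ hpre
  unfold Spec_isrange isrange isrange_alt
  have hsep : sep ≠ "" := hpre.1
  have hsepL : sep.toList ≠ [] := by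
    intro hn
    exact hsep (by
      have := congrArg String.ofList hn
      simpa using this)
  have hmap := PySem.Str.split?_map string sep
  rw [show PySem.Chars.split? string.toList sep.toList
        = some (PySem.Chars.splitOn string.toList sep.toList) from by
      simp [PySem.Chars.split?, List.isEmpty_iff, hsepL]] at hmap
  cases hsplit : PySem.Str.split? string sep with
  | none => rw [hsplit] at hmap; simp at hmap
  | some L =>
      rw [hsplit] at hmap
      simp only [Option.map_some] at hmap
      replace hmap : L.map String.toList = PySem.Chars.splitOn string.toList sep.toList := by
        exact Option.some.inj hmap
      show pvLoopA (if positive = true then pvIspositive else pvIsnumber) rangesep ((some L).getD []) [] =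
        match pvParse positive sep.toList rangesep.toList string.toList with
        | none => []
        | some l => l
      rw [show (if positive = true then pvIspositive else pvIsnumber) = pvFnc positive from by
            cases positive <;> rfl]
      simp only [Option.getD_some]
      rw [pvLoopA_eq, ← pvTokens_bridge, hmap,
          ← pvParse_eq_tokens positive sep.toList rangesep.toList hsepL string.toList]
      cases pvParse positive sep.toList rangesep.toList string.toList <;> simp
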